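-- pv_equiv track=rewrite | github.com/kswoong1819/Python-Algorithm | 코드잇/빠르게 산 오르기.py | select_stops
-- ===== SOURCE A (Python) =====
-- def select_stops(water_stops, capacity):
--     # 코드를 작성하세요.
--     result = []
--     dis = 0
--     while dis < water_stops[-1]:
--         dis += capacity
--         while 1:
--             if dis not in water_stops:
--                 dis -= 1
--             else:
--                 result.append(dis)
--                 break
--
--     return result
-- ===== SOURCE B (Python) =====
-- def _largest_le(stops, x):
--     """Index of the rightmost element of the sorted list `stops` that is <= x (-1 if none)."""
--     lo, hi = 0, len(stops)
--     while lo < hi: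
--         mid = (lo + hi) // 2
--         if stops[mid] <= x:
--             lo = mid + 1
--         else:
--             hi = mid
--     return lo - 1
--
-- def select_stops(water_stops, capacity):
--     last = water_stops[-1]
--     stops = sorted(set(water_stops))
--     result = []
--     pos = 0
--     while pos < last:
--         pos = stops[_largest_le(stops, pos + capacity)]
--         result.append(pos)
--     return result
-- ===== Notes on version B (the rewrite author's own statement) =====
-- stated objective: alternative
-- what changed: A repeatedly scans the whole list once per unit-decrement of the candidate distance; B sorts the distinct stops once and finds each jump's furthest reachable stop by binary search (B pays the sort up front, so it is not faster on inputs whose loop barely runs).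
import Mathlib
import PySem

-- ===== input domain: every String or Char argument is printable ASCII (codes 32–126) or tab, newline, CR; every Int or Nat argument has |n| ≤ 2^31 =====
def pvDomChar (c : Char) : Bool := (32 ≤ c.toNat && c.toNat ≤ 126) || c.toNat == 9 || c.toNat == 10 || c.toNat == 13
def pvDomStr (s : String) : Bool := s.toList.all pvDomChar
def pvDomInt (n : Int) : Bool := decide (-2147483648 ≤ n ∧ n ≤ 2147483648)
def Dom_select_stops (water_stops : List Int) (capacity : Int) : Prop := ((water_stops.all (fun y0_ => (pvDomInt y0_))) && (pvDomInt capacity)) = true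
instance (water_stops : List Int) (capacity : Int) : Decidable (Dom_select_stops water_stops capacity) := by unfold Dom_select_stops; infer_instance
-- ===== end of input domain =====

-- B replaces A's per-unit decrement-and-membership scan by one sort of the distinct
-- stops plus a binary search per jump (alternative algorithm; same return value on Pre_).


-- ===== PORT A =====
-- fuel bound for the inner 'while 1: dis -= 1' loop (a totality device only;
-- Pre_ guarantees it suffices — see pvInnerA_eq_some below)
def pvInnerFuelA (water_stops : List Int) (d : Int) : Nat :=
  (d - ((PySem.List.min? water_stops (fun y => y)).getD 0) + 1).toNat

-- inner loop: decrement dis until it is a member ('while 1: if dis not in …')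
def pvInnerA (water_stops : List Int) : Int → Nat → Option Int
  | _, 0 => none
  | d, fuel+1 =>
    if d ∈ water_stops then some d
    else pvInnerA water_stops (d - 1) fuel

-- outer loop: 'while dis < water_stops[-1]: dis += capacity; …; result.append(dis)'
def pvOuterA (water_stops : List Int) (capacity l : Int) : Int → List Int → Nat → Option (List Int)
  | _, _, 0 => none
  | dis, res, fuel+1 =>
    if dis < l then
      match pvInnerA water_stops (dis + capacity) (pvInnerFuelA water_stops (dis + capacity)) with
      | none => none
      | some d => pvOuterA water_stops capacity l d (res ++ [d]) fuel
    else some res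

def select_stops (water_stops : List Int) (capacity : Int) : List Int :=
  match PySem.List.pyGet? water_stops (-1) with
  | none => []  -- water_stops[-1] raises IndexError in Python; excluded by Pre_
  | some l => (pvOuterA water_stops capacity l 0 [] (water_stops.length + 1)).getD []

-- ===== PORT B =====
-- _largest_le: binary search on the sorted list for the rightmost index with value ≤ x
def pvLargestLe (stops : List Int) (x lo hi : Int) : Int :=
  if h : lo < hi then
    let mid := PySem.Int.floordiv (lo + hi) 2
    if PySem.List.pyGetD stops mid 0 ≤ x then
      pvLargestLe stops x (mid + 1) hi
    else
      pvLargestLe stops x lo mid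
  else lo - 1
termination_by (hi - lo).toNat
decreasing_by
  · have h2 : PySem.Int.floordiv (lo + hi) 2 = (lo + hi) / 2 := by
      simp [PySem.Int.floordiv, Int.fdiv_eq_ediv]
    omega
  · have h2 : PySem.Int.floordiv (lo + hi) 2 = (lo + hi) / 2 := by
      simp [PySem.Int.floordiv, Int.fdiv_eq_ediv]
    omega

-- outer loop of B: 'while pos < last: pos = stops[_largest_le(stops, pos+capacity)]; …'
-- (fuel is a totality device only; Pre_ guarantees it suffices)
def pvOuterB (stops : List Int) (l capacity : Int) : Int → List Int → Nat → Option (List Int)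
  | _, _, 0 => none
  | pos, res, fuel+1 =>
    if pos < l then
      match PySem.List.pyGet? stops (pvLargestLe stops (pos + capacity) 0 stops.length) with
      | none => none  -- stops[-1] on empty stops: IndexError; unreachable under Pre_
      | some p => pvOuterB stops l capacity p (res ++ [p]) fuel
    else some res

def select_stops_alt (water_stops : List Int) (capacity : Int) : List Int :=
  match PySem.List.pyGet? water_stops (-1) with
  | none => []  -- water_stops[-1] raises IndexError in Python; excluded by Pre_
  | some l =>
    let stops := PySem.List.sorted (PySem.Set.ofList water_stops) (fun y => y) false
    (pvOuterB stops l capacity 0 [] (stops.length + 1)).getD []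

-- ===== PRECONDITION & SPEC =====
-- Pre_ excludes exactly the inputs on which the Python A does not return: the empty
-- list (IndexError) and the inputs on which A's while-loops run forever (no water
-- stop strictly beyond the current position within capacity ever becomes available).
def Pre_select_stops (water_stops : List Int) (capacity : Int) : Prop :=
  water_stops ≠ [] ∧
  (0 < water_stops.getLast?.getD 0 →
     ∃ y ∈ water_stops, 0 < y ∧ y ≤ capacity) ∧
  (∀ x ∈ water_stops, 0 < x → x < water_stops.getLast?.getD 0 →
     ∃ y ∈ water_stops, x < y ∧ y ≤ x + capacity)

instance (water_stops : List Int) (capacity : Int) : Decidable (Pre_select_stops water_stops capacity) := by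
  unfold Pre_select_stops; infer_instance

def pvWitness_select_stops : List Int × Int := ([1, 2], 2)

def Spec_select_stops (water_stops : List Int) (capacity : Int) (out : List Int) : Prop := out = select_stops_alt water_stops capacity
instance (water_stops : List Int) (capacity : Int) (out : List Int) : Decidable (Spec_select_stops water_stops capacity out) := by unfold Spec_select_stops; infer_instance

-- ===== CLAIM (what is proved, stated in full; the proofs are below) =====
def Claim_equal_select_stops : Prop := ∀ (water_stops : List Int) (capacity : Int), Dom_select_stops water_stops capacity → Pre_select_stops water_stops capacity → Spec_select_stops water_stops capacity (select_stops water_stops capacity)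

-- ===== LEMMAS AND PROOFS =====

-- 'g is the greatest member of ws that is ≤ d'
def pvIsG (ws : List Int) (d g : Int) : Prop :=
  g ∈ ws ∧ g ≤ d ∧ ∀ y ∈ ws, y ≤ d → y ≤ g

theorem pvIsG_unique {ws ws' : List Int} {d g g' : Int}
    (hmem : ∀ y : Int, y ∈ ws ↔ y ∈ ws')
    (h : pvIsG ws d g) (h' : pvIsG ws' d g') : g = g' := by
  obtain ⟨hg, hgd, hmax⟩ := h
  obtain ⟨hg', hgd', hmax'⟩ := h'
  have h1 : g ≤ g' := hmax' g ((hmem g).mp hg) hgd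
  have h2 : g' ≤ g := hmax g' ((hmem g').mpr hg') hgd'
  omega

theorem pvExists_isG (ws : List Int) (d : Int) (h : ∃ y ∈ ws, y ≤ d) :
    ∃ g, pvIsG ws d g := by
  obtain ⟨y, hy, hyd⟩ := h
  have hne : ws.filter (fun z => decide (z ≤ d)) ≠ [] := by
    intro hnil
    have : y ∈ ws.filter (fun z => decide (z ≤ d)) := by
      simp [List.mem_filter, hy, hyd]
    simp [hnil] at this
  have hmaxne : PySem.List.max? (ws.filter (fun z => decide (z ≤ d))) (fun z => z) ≠ none := by
    intro h
    exact hne ((PySem.List.max?_eq_none_iff _ _).mp h)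
  obtain ⟨m, hm⟩ := Option.ne_none_iff_exists'.mp hmaxne
  refine ⟨m, ?_, ?_, ?_⟩
  · have := PySem.List.max?_mem hm
    exact (List.mem_filter.mp this).1
  · have := PySem.List.max?_mem hm
    have := (List.mem_filter.mp this).2
    simpa using this
  · intro z hz hzd
    have hzf : z ∈ ws.filter (fun w => decide (w ≤ d)) := by
      simp [List.mem_filter, hz, hzd]
    exact PySem.List.max?_isMax hm z hzf

theorem pvInnerA_eq_some (ws : List Int) :
    ∀ fuel : Nat, ∀ d g : Int, pvIsG ws d g → (d - g).toNat < fuel →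
    pvInnerA ws d fuel = some g := by
  intro fuel
  induction fuel with
  | zero => intro d g _ h; omega
  | succ n ih =>
    intro d g hG h
    obtain ⟨hg, hgd, hmax⟩ := hG
    by_cases hd : d ∈ ws
    · have h1 : d ≤ g := hmax d hd le_rfl
      have h2 : g = d := le_antisymm hgd h1
      simp [pvInnerA, hd, h2]
    · have hgne : g ≠ d := fun e => hd (e ▸ hg)
      have hrec := ih (d - 1) g ⟨hg, by omega, fun y hy hyd => hmax y hy (by omega)⟩ (by omega)
      simp [pvInnerA, hd, hrec]

theorem pvSorted_getD_mono (stops : List Int) (hs : stops.Pairwise (· ≤ ·))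
    (i j : Nat) (hij : i ≤ j) (hj : j < stops.length) :
    stops.getD i 0 ≤ stops.getD j 0 := by
  rcases Nat.eq_or_lt_of_le hij with rfl | h
  · exact le_rfl
  · have hord := List.pairwise_iff_getElem.mp hs i j (by omega) hj h
    rw [List.getD_eq_getElem stops 0 (by omega), List.getD_eq_getElem stops 0 hj]
    exact hord

theorem pvLargestLe_inv (stops : List Int) (x : Int)
    (hs : stops.Pairwise (· ≤ ·)) :
    ∀ n : Nat, ∀ lo hi : Int, (hi - lo).toNat ≤ n →
    0 ≤ lo → lo ≤ hi → hi ≤ (stops.length : Int) →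
    (∀ j : Nat, j < stops.length → (j : Int) < lo → stops.getD j 0 ≤ x) →
    (∀ j : Nat, j < stops.length → hi ≤ (j : Int) → x < stops.getD j 0) →
    lo - 1 ≤ pvLargestLe stops x lo hi ∧
    pvLargestLe stops x lo hi ≤ hi - 1 ∧
    (∀ j : Nat, j < stops.length →
      (stops.getD j 0 ≤ x ↔ (j : Int) ≤ pvLargestLe stops x lo hi)) := by
  intro n
  induction n with
  | zero =>
    intro lo hi hn h0 hlh hhl hlow hhigh
    have hnl : ¬ lo < hi := by omega
    rw [pvLargestLe, dif_neg hnl]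
    refine ⟨by omega, by omega, fun j hj => ?_⟩
    constructor
    · intro hle
      by_contra hgt
      exact absurd (hhigh j hj (by omega)) (by omega)
    · intro hjle
      exact hlow j hj (by omega)
  | succ n ih =>
    intro lo hi hn h0 hlh hhl hlow hhigh
    by_cases hlt : lo < hi
    · rw [pvLargestLe, dif_pos hlt]
      have hmideq : PySem.Int.floordiv (lo + hi) 2 = (lo + hi) / 2 := by
        simp [PySem.Int.floordiv, Int.fdiv_eq_ediv]
      set mid := PySem.Int.floordiv (lo + hi) 2 with hmiddef
      have hmlo : lo ≤ mid := by omega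
      have hmhi : mid < hi := by omega
      have hget : PySem.List.pyGetD stops mid 0 = stops.getD mid.toNat 0 := by
        rw [PySem.List.pyGetD_eq_getElem stops 0 (by omega) (by omega),
            List.getD_eq_getElem stops 0 (by omega)]
      by_cases hc : PySem.List.pyGetD stops mid 0 ≤ x
      · rw [if_pos hc]
        have hlow' : ∀ j, j < stops.length → (j : Int) < mid + 1 → stops.getD j 0 ≤ x := by
          intro j hj hjlt
          by_cases hjlo : (j : Int) < lo
          · exact hlow j hj hjlo
          · have : stops.getD j 0 ≤ stops.getD mid.toNat 0 :=
              pvSorted_getD_mono stops hs j mid.toNat (by omega) (by omega)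
            rw [hget] at hc
            omega
        obtain ⟨ha, hb, hco⟩ := ih (mid + 1) hi (by omega) (by omega) (by omega) hhl hlow' hhigh
        exact ⟨by omega, hb, hco⟩
      · rw [if_neg hc]
        have hhigh' : ∀ j, j < stops.length → mid ≤ (j : Int) → x < stops.getD j 0 := by
          intro j hj hjge
          by_cases hjhi : hi ≤ (j : Int)
          · exact hhigh j hj hjhi
          · have : stops.getD mid.toNat 0 ≤ stops.getD j 0 :=
              pvSorted_getD_mono stops hs mid.toNat j (by omega) hj
            rw [hget] at hc
            omega
        obtain ⟨ha, hb, hco⟩ := ih lo mid (by omega) h0 (by omega) (by omega) hlow hhigh'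
        exact ⟨ha, by omega, hco⟩
    · rw [pvLargestLe, dif_neg hlt]
      refine ⟨by omega, by omega, fun j hj => ?_⟩
      constructor
      · intro hle
        by_contra hgt
        exact absurd (hhigh j hj (by omega)) (by omega)
      · intro hjle
        exact hlow j hj (by omega)

theorem pvFilter_length_le (l : List Int) (p q : Int) (hpq : p ≤ q) :
    (l.filter (fun y => decide (q < y))).length ≤ (l.filter (fun y => decide (p < y))).length := by
  induction l with
  | nil => simp
  | cons a t ih =>
    simp only [List.filter_cons]
    by_cases h1 : q < a
    · rw [if_pos (by simpa using h1), if_pos (by simp; omega)]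
      simpa using ih
    · rw [if_neg (by simpa using h1)]
      by_cases h2 : p < a
      · rw [if_pos (by simpa using h2)]
        simp only [List.length_cons]
        omega
      · rw [if_neg (by simpa using h2)]
        exact ih

theorem pvFilter_length_lt (l : List Int) (p q : Int) (hpq : p < q) (hq : q ∈ l) :
    (l.filter (fun y => decide (q < y))).length < (l.filter (fun y => decide (p < y))).length := by
  induction l with
  | nil => simp at hq
  | cons a t ih =>
    rcases List.mem_cons.mp hq with rfl | hqt
    · simp only [List.filter_cons]
      rw [if_neg (by simp), if_pos (by simpa using hpq)]
      have hle := pvFilter_length_le t p q (le_of_lt hpq)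
      simp only [List.length_cons]
      omega
    · have hlt := ih hqt
      simp only [List.filter_cons]
      by_cases h1 : q < a
      · rw [if_pos (by simpa using h1), if_pos (by simp; omega)]
        simpa using hlt
      · rw [if_neg (by simpa using h1)]
        by_cases h2 : p < a
        · rw [if_pos (by simpa using h2)]
          simp only [List.length_cons]
          omega
        · rw [if_neg (by simpa using h2)]
          exact hlt

theorem pvOuter_eq (ws : List Int) (cap l : Int)
    (hl : ws.getLast? = some l)
    (hpre1 : 0 < l → ∃ y ∈ ws, 0 < y ∧ y ≤ cap)
    (hpre2 : ∀ x ∈ ws, 0 < x → x < l → ∃ y ∈ ws, x < y ∧ y ≤ x + cap) :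
    ∀ fa : Nat, ∀ pos : Int, ∀ res : List Int, ∀ fb : Nat,
    (pos = 0 ∨ (pos ∈ ws ∧ 0 < pos)) →
    ((PySem.List.sorted (PySem.Set.ofList ws) (fun y => y) false).filter
        (fun y => decide (pos < y))).length < fa →
    ((PySem.List.sorted (PySem.Set.ofList ws) (fun y => y) false).filter
        (fun y => decide (pos < y))).length < fb →
    ∃ out, pvOuterA ws cap l pos res fa = some out ∧
      pvOuterB (PySem.List.sorted (PySem.Set.ofList ws) (fun y => y) false) l cap pos res fb = some out := by
  intro fa
  induction fa with
  | zero => intro pos res fb _ hfa _; omega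
  | succ fa ih =>
    intro pos res fb hpos hfa hfb
    obtain ⟨fb', rfl⟩ : ∃ fb', fb = fb' + 1 := ⟨fb - 1, by omega⟩
    set stops := PySem.List.sorted (PySem.Set.ofList ws) (fun y => y) false with hstops
    by_cases hpl : pos < l
    · -- loop body runs on both sides
      have hws_ne : ws ≠ [] := by intro h; simp [h] at hl
      have hpos0 : 0 ≤ pos := by rcases hpos with rfl | ⟨_, h⟩ <;> omega
      have hsucc : ∃ y ∈ ws, pos < y ∧ y ≤ pos + cap := by
        rcases hpos with rfl | ⟨hmem, hposgt⟩
        · obtain ⟨y, hy, h1, h2⟩ := hpre1 hpl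
          exact ⟨y, hy, h1, by omega⟩
        · exact hpre2 pos hmem hposgt hpl
      obtain ⟨g, hG⟩ := pvExists_isG ws (pos + cap)
        (by obtain ⟨y, hy, _, h2⟩ := hsucc; exact ⟨y, hy, h2⟩)
      obtain ⟨hgmem, hgle, hgmax⟩ := hG
      have hgpos : pos < g := by
        obtain ⟨y, hy, h1, h2⟩ := hsucc
        have := hgmax y hy h2
        omega
      have hmem_iff : ∀ y : Int, y ∈ stops ↔ y ∈ ws := by
        intro y
        rw [hstops, PySem.List.mem_sorted, PySem.Set.mem_ofList]
      -- A side: the inner decrement loop returns the greatest member ≤ pos + cap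
      have hminne : PySem.List.min? ws (fun y => y) ≠ none := by
        intro h
        exact hws_ne ((PySem.List.min?_eq_none_iff _ _).mp h)
      obtain ⟨m0, hm0⟩ := Option.ne_none_iff_exists'.mp hminne
      have hm0g : m0 ≤ g := PySem.List.min?_isMin hm0 g hgmem
      have hfuel : (pos + cap - g).toNat < pvInnerFuelA ws (pos + cap) := by
        simp only [pvInnerFuelA, hm0, Option.getD_some]
        omega
      have hInner := pvInnerA_eq_some ws _ (pos + cap) g ⟨hgmem, hgle, hgmax⟩ hfuel
      -- B side: the binary search finds the same stop
      have hsort_lt : stops.Pairwise (· < ·) := by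
        rw [hstops]; exact PySem.List.sorted_ofList_pairwise_lt ws
      have hsort : stops.Pairwise (· ≤ ·) := hsort_lt.imp le_of_lt
      obtain ⟨hr1, hr2, hriff⟩ := pvLargestLe_inv stops (pos + cap) hsort stops.length
        0 stops.length (by omega) le_rfl (by omega) le_rfl
        (by intro j _ hj; omega)
        (by intro j hj hjge; omega)
      set r := pvLargestLe stops (pos + cap) 0 stops.length with hrdef
      obtain ⟨jg, hjg, hjgeq⟩ := List.mem_iff_getElem.mp ((hmem_iff g).mpr hgmem)
      have hjgD : stops.getD jg 0 = g := by
        rw [List.getD_eq_getElem stops 0 hjg]; exact hjgeq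
      have hjgr : (jg : Int) ≤ r := (hriff jg hjg).mp (by rw [hjgD]; exact hgle)
      have hr0 : 0 ≤ r := by omega
      have hrlen : r < (stops.length : Int) := by omega
      have hget : PySem.List.pyGet? stops r = some (stops.getD r.toNat 0) := by
        rw [PySem.List.pyGet?_eq_some_getElem stops hr0 hrlen,
            List.getD_eq_getElem stops 0 (by omega)]
      have hg'G : pvIsG stops (pos + cap) (stops.getD r.toNat 0) := by
        refine ⟨?_, ?_, ?_⟩
        · rw [List.getD_eq_getElem stops 0 (by omega)]
          exact List.getElem_mem _
        · exact (hriff r.toNat (by omega)).mpr (by omega)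
        · intro y hy hyle
          obtain ⟨jy, hjy, hjyeq⟩ := List.mem_iff_getElem.mp hy
          have hjyD : stops.getD jy 0 = y := by
            rw [List.getD_eq_getElem stops 0 hjy]; exact hjyeq
          have : (jy : Int) ≤ r := (hriff jy hjy).mp (by rw [hjyD]; exact hyle)
          have := pvSorted_getD_mono stops hsort jy r.toNat (by omega) (by omega)
          omega
      have hg'eq : stops.getD r.toNat 0 = g :=
        pvIsG_unique hmem_iff hg'G ⟨hgmem, hgle, hgmax⟩
      rw [hg'eq] at hget
      -- recurse
      have hdec := pvFilter_length_lt stops pos g hgpos ((hmem_iff g).mpr hgmem)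
      obtain ⟨out, hA, hB⟩ := ih g (res ++ [g]) fb'
        (Or.inr ⟨hgmem, by omega⟩) (by omega) (by omega)
      refine ⟨out, ?_, ?_⟩
      · simp only [pvOuterA, if_pos hpl, hInner]
        exact hA
      · simp only [pvOuterB, if_pos hpl, ← hrdef, hget]
        exact hB
    · exact ⟨res, by simp [pvOuterA, hpl], by simp [pvOuterB, hpl]⟩

-- ===== VERDICT (by name: the statement is the Claim_ definition above) =====
theorem select_stops_spec : Claim_equal_select_stops := by
  unfold Claim_equal_select_stops
  intro ws cap _ hpre
  obtain ⟨hne, hp1, hp2⟩ := hpre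
  unfold Spec_select_stops
  obtain ⟨l, hl⟩ := Option.ne_none_iff_exists'.mp
    (fun h => hne (List.getLast?_eq_none_iff.mp h))
  rw [hl] at hp1 hp2
  simp only [Option.getD_some] at hp1 hp2
  set stops := PySem.List.sorted (PySem.Set.ofList ws) (fun y => y) false with hstops
  have hlen : stops.length ≤ ws.length := by
    rw [hstops, PySem.List.length_sorted]
    exact PySem.Set.length_ofList_le ws
  have hflt : (stops.filter (fun y => decide ((0 : Int) < y))).length ≤ stops.length :=
    List.length_filter_le _ _
  obtain ⟨out, hA, hB⟩ := pvOuter_eq ws cap l hl hp1 hp2 (ws.length + 1) 0 [] (stops.length + 1)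
    (Or.inl rfl) (by rw [← hstops]; omega) (by rw [← hstops]; omega)
  simp only [select_stops, select_stops_alt, PySem.List.pyGet?_neg_one, hl]
  rw [← hstops] at *
  rw [hA, hB]
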